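-- pv_equiv track=rewrite | github.com/bollu/IIIT-H-Code | databases1/20161105_Assignment1.py | canonical_col_names
-- ===== SOURCE A (Python) =====
-- def canonical_col_names(colixs, col2ix, ix2cols):
--     canon = [None for _ in range(len(colixs))]
--     i = 0
--     for ix in colixs:
--         # this column has a "small" name, which means
--         # it was safe.
--         small = [c for c in ix2cols[ix] if not '.' in c]
--         full = [c for c in ix2cols[ix] if '.' in c]
--         if small: canon[i] = small[0]
--         else: canon[i] = full[0]
--         i += 1
--
--     return canon
-- ===== SOURCE B (Python) =====
-- def canonical_col_names(colixs, col2ix, ix2cols):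
--     # Stable sort puts all dot-free names (key False) first, keeping original
--     # order, so [0] is the first dot-free name if any, else the first dotted one.
--     return [sorted(ix2cols[ix], key=lambda c: '.' in c)[0] for ix in colixs]
-- ===== Notes on version B (the rewrite author's own statement) =====
-- stated objective: idiomatic
-- what changed: A builds two filtered lists per index (dotless and dotted) and picks small[0] or full[0] in an explicit loop with a counter; B is a one-line comprehension selecting head of a stable sort keyed by '.' in c, whose stability places dotless names first in original order.
import Mathlib
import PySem

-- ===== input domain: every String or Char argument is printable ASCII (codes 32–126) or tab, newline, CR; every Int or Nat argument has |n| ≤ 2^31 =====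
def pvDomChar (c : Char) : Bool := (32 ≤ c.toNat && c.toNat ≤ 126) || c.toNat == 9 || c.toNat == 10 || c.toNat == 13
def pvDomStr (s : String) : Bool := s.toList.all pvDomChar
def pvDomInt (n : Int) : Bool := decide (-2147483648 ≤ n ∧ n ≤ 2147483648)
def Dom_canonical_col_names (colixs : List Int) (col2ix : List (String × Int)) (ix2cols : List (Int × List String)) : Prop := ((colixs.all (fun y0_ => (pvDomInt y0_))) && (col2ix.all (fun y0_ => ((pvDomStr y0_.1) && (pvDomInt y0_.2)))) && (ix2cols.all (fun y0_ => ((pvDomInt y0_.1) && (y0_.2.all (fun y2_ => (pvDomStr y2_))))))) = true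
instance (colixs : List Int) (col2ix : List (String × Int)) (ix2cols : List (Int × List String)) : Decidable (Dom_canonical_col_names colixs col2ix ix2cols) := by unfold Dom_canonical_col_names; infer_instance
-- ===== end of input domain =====

-- B replaces A's per-index partition into two filtered lists with a single stable
-- sort keyed by '.' in c, taking the head (idiomatic; no speed claim).


-- ===== PORT A =====
-- A: for each ix, filter ix2cols[ix] into dotless ('small') and dotted ('full') names,
-- take small[0] if small is nonempty else full[0]; canon is filled slot by slot.
def canonical_col_names (colixs : List Int) (col2ix : List (String × Int)) (ix2cols : List (Int × List String)) : List String :=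
  colixs.foldl (fun canon ix =>
    let cols := (ix2cols.lookup ix).getD []   -- ix2cols[ix]; KeyError (none) is excluded by Pre_
    let small := cols.filter (fun c => !(PySem.Str.isIn "." c))
    let full := cols.filter (fun c => PySem.Str.isIn "." c)
    canon ++ [if small ≠ [] then small.headD "" else full.headD ""]) []   -- [0] on empty is excluded by Pre_

-- ===== PORT B =====
-- B: [sorted(ix2cols[ix], key=lambda c: '.' in c)[0] for ix in colixs]
def canonical_col_names_alt (colixs : List Int) (col2ix : List (String × Int)) (ix2cols : List (Int × List String)) : List String :=
  colixs.map (fun ix =>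
    (PySem.List.sorted ((ix2cols.lookup ix).getD []) (fun c => PySem.Str.isIn "." c) false).headD "")
    -- ix2cols[ix] (KeyError) and [0] on the empty list (IndexError) are excluded by Pre_

-- ===== PRECONDITION & SPEC =====
-- Pre_ excludes exactly the inputs on which A raises: an ix in colixs with no entry in
-- ix2cols (KeyError) or whose entry is the empty list (IndexError on full[0]).
def Pre_canonical_col_names (colixs : List Int) (col2ix : List (String × Int)) (ix2cols : List (Int × List String)) : Prop :=
  ∀ ix ∈ colixs, (ix2cols.lookup ix).any (fun cols => !cols.isEmpty) = true
instance (colixs : List Int) (col2ix : List (String × Int)) (ix2cols : List (Int × List String)) : Decidable (Pre_canonical_col_names colixs col2ix ix2cols) := by unfold Pre_canonical_col_names; infer_instance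

def pvWitness_canonical_col_names : List Int × (List (String × Int)) × (List (Int × List String)) :=
  ([1, 2, 1], [], [(1, ["t.a", "a"]), (2, ["b.x"]), (3, [])])

def Spec_canonical_col_names (colixs : List Int) (col2ix : List (String × Int)) (ix2cols : List (Int × List String)) (out : List String) : Prop := out = canonical_col_names_alt colixs col2ix ix2cols
instance (colixs : List Int) (col2ix : List (String × Int)) (ix2cols : List (Int × List String)) (out : List String) : Decidable (Spec_canonical_col_names colixs col2ix ix2cols out) := by unfold Spec_canonical_col_names; infer_instance

-- ===== CLAIM (what is proved, stated in full; the proofs are below) =====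
def Claim_equal_canonical_col_names : Prop := ∀ (colixs : List Int) (col2ix : List (String × Int)) (ix2cols : List (Int × List String)), Dom_canonical_col_names colixs col2ix ix2cols → Pre_canonical_col_names colixs col2ix ix2cols → Spec_canonical_col_names colixs col2ix ix2cols (canonical_col_names colixs col2ix ix2cols)

-- ===== LEMMAS AND PROOFS =====

-- Inserting an element whose key is false into (falses ++ trues) keeps the shape:
-- it passes all the falses and lands just before the trues.
theorem pv_insertBy_key_false (key : String → Bool) (x : String) (hx : key x = false)
    (A B : List String) (hA : ∀ a ∈ A, key a = false) (hB : ∀ b ∈ B, key b = true) :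
    PySem.List.insertBy (fun a b => decide (key a < key b)) x (A ++ B) = (A ++ [x]) ++ B := by
  induction A with
  | nil =>
      cases B with
      | nil => rfl
      | cons b B' =>
          have hb : key b = true := hB b (List.mem_cons_self ..)
          simp [PySem.List.insertBy, hx, hb]
  | cons a A' ih =>
      have ha : key a = false := hA a (List.mem_cons_self ..)
      have := ih (fun a' ha' => hA a' (List.mem_cons_of_mem _ ha'))
      simp only [List.cons_append, PySem.List.insertBy, hx, ha]
      simp [this]

-- The stable insertion-sort loop over a Bool key, started from (falses ++ trues),
-- appends the new falses after A and the new trues after B.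
theorem pv_foldl_insertBy_partition (key : String → Bool) (xs A B : List String)
    (hA : ∀ a ∈ A, key a = false) (hB : ∀ b ∈ B, key b = true) :
    xs.foldl (fun acc x => PySem.List.insertBy (fun a b => decide (key a < key b)) x acc) (A ++ B)
      = (A ++ xs.filter (fun c => !key c)) ++ (B ++ xs.filter key) := by
  induction xs generalizing A B with
  | nil => simp
  | cons x xs ih =>
      simp only [List.foldl_cons]
      by_cases hx : key x = true
      · have hins : PySem.List.insertBy (fun a b => decide (key a < key b)) x (A ++ B)
            = A ++ (B ++ [x]) := by
          rw [← List.append_assoc]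
          refine PySem.List.insertBy_of_forall_not_before _ _ _ ?_
          intro y hy
          simp only [decide_eq_false_iff_not, not_lt, hx]
          exact Bool.le_true _
        rw [hins, ih A (B ++ [x]) hA (by
          intro b hb
          rcases List.mem_append.mp hb with h | h
          · exact hB b h
          · simpa using (List.mem_singleton.mp h) ▸ hx)]
        simp [hx]
      · have hx' : key x = false := Bool.eq_false_iff.mpr hx
        rw [pv_insertBy_key_false key x hx' A B hA hB,
          ih (A ++ [x]) B (by
            intro a ha
            rcases List.mem_append.mp ha with h | h
            · exact hA a h
            · simpa using (List.mem_singleton.mp h) ▸ hx') hB]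
        simp [hx']

-- sorted by a Bool key = dot-free names (in order) then dotted names (in order).
theorem pv_sorted_bool_key (key : String → Bool) (xs : List String) :
    PySem.List.sorted xs key false = xs.filter (fun c => !key c) ++ xs.filter key := by
  rw [PySem.List.sorted_eq_foldl_insertBy]
  simpa using pv_foldl_insertBy_partition key xs [] [] (by simp) (by simp)

-- ===== VERDICT (by name: the statement is the Claim_ definition above) =====
theorem canonical_col_names_spec : Claim_equal_canonical_col_names := by
  intro colixs col2ix ix2cols _ _
  unfold Spec_canonical_col_names canonical_col_names canonical_col_names_alt
  rw [PySem.List.foldl_append_singleton_eq_map]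
  refine List.map_congr_left ?_
  intro ix _
  rw [pv_sorted_bool_key]
  rcases hsm : ((ix2cols.lookup ix).getD []).filter (fun c => !(PySem.Str.isIn "." c)) with _ | ⟨a, t⟩
  · simp
  · simp
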